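-- pv_equiv track=rewrite | github.com/GerogeP/python | test/vacation.py | solution
-- ===== SOURCE A (Python) =====
-- def solution(a):
--     # Write your answer here
--     short = len(a)
--     counter = 1
--     while counter < len(a):
--         cut = a[:counter]
--         if set(cut) == set(a):
--             short = len(set(cut)) if len(set(cut)) < short else short
--         counter += 1
--     return short
-- ===== SOURCE B (Python) =====
-- def solution(a):
--     # Shortest prefix containing all distinct values: some proper prefix already
--     # contains every distinct element iff the last element occurs earlier, and
--     # then the answer A computes is the number of distinct elements.
--     if a and a[-1] in a[:-1]:
--         return len(set(a))
--     return len(a)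
-- ===== Notes on version B (the rewrite author's own statement) =====
-- stated objective: faster
-- what changed: Replaces the quadratic loop that rebuilds and compares set(a[:counter]) for every counter with a single check: if the last element occurs earlier the answer is len(set(a)), otherwise len(a).
import Mathlib
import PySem

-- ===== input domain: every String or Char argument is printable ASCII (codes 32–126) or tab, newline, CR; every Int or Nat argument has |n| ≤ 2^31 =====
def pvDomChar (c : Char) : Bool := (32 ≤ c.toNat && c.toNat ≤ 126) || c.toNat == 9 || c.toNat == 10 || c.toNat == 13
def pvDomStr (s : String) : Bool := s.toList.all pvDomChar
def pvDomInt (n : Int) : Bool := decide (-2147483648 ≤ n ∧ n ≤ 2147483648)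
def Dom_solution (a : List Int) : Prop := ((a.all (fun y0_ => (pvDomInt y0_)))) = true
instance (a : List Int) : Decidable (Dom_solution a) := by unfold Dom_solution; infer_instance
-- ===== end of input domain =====

-- B replaces A's quadratic prefix-set comparison loop by a single check on the last
-- element (faster, asymptotic: O(n) instead of O(n^2)).


-- ===== PORT A =====
def solution (a : List Int) : Int :=
  (PySem.List.pyRange 1 (PySem.List.len a) 1).foldl
    (fun short counter =>
      let cut := PySem.List.slice a none (some counter)
      if PySem.Set.equal (PySem.Set.ofList cut) (PySem.Set.ofList a) then
        (if ((PySem.Set.ofList cut).length : Int) < short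
         then ((PySem.Set.ofList cut).length : Int) else short)
      else short)
    (PySem.List.len a)

-- ===== PORT B =====
def solution_alt (a : List Int) : Int :=
  match a.getLast? with
  | some x =>
      if x ∈ a.dropLast then ((PySem.Set.ofList a).length : Int)
      else PySem.List.len a
  | none => PySem.List.len a

-- ===== PRECONDITION & SPEC =====
def Spec_solution (a : List Int) (out : Int) : Prop := out = solution_alt a
instance (a : List Int) (out : Int) : Decidable (Spec_solution a out) := by unfold Spec_solution; infer_instance

-- ===== CLAIM (what is proved, stated in full; the proofs are below) =====
def Claim_equal_solution : Prop := ∀ (a : List Int), Dom_solution a → Spec_solution a (solution a)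

-- ===== LEMMAS AND PROOFS =====

-- equal sets of two lists have the same number of distinct elements
lemma pv_len_eq_of_equal (xs ys : List Int)
    (h : PySem.Set.equal (PySem.Set.ofList xs) (PySem.Set.ofList ys) = true) :
    (PySem.Set.ofList xs).length = (PySem.Set.ofList ys).length := by
  rw [PySem.Set.equal_iff] at h
  exact List.Perm.length_eq
    ((List.perm_ext_iff_of_nodup (PySem.Set.nodup_ofList xs) (PySem.Set.nodup_ofList ys)).2 h)

-- the condition "set(a[:k]) == set(a)" is monotone in k
lemma pv_cond_mono (a : List Int) (k m : Nat) (hkm : k ≤ m)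
    (h : PySem.Set.equal (PySem.Set.ofList (a.take k)) (PySem.Set.ofList a) = true) :
    PySem.Set.equal (PySem.Set.ofList (a.take m)) (PySem.Set.ofList a) = true := by
  rw [PySem.Set.equal_iff] at h ⊢
  intro x
  simp only [PySem.Set.mem_ofList] at h ⊢
  constructor
  · exact fun hx => List.mem_of_mem_take hx
  · intro hx
    have h1 : x ∈ a.take k := (h x).2 hx
    have h2 : x ∈ (a.take m).take k := by
      rw [List.take_take, Nat.min_eq_left hkm]; exact h1
    exact List.mem_of_mem_take h2

-- characterisation of A's loop up to counter bound m
lemma pv_loop_spec (a : List Int) (m : Nat) (hm : m ≤ a.length) :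
    (PySem.List.pyRange 1 (m : Int) 1).foldl
      (fun short counter =>
        let cut := PySem.List.slice a none (some counter)
        if PySem.Set.equal (PySem.Set.ofList cut) (PySem.Set.ofList a) then
          (if ((PySem.Set.ofList cut).length : Int) < short
           then ((PySem.Set.ofList cut).length : Int) else short)
        else short)
      (a.length : Int) =
    if 2 ≤ m ∧ PySem.Set.equal (PySem.Set.ofList (a.take (m - 1))) (PySem.Set.ofList a) = true
    then ((PySem.Set.ofList a).length : Int) else (a.length : Int) := by
  induction m with
  | zero => simp [PySem.List.pyRange_one_eq_nil]
  | succ m ih =>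
    by_cases h1 : m = 0
    · subst h1
      rw [show ((1 : Nat) : Int) = 1 by norm_num, PySem.List.pyRange_one_eq_nil le_rfl]
      simp
    · have hm' : m ≤ a.length := Nat.le_of_succ_le hm
      have h1' : (1 : Int) ≤ (m : Int) := by exact_mod_cast Nat.one_le_iff_ne_zero.2 h1
      rw [show ((m + 1 : Nat) : Int) = (m : Int) + 1 by push_cast; ring,
        PySem.List.pyRange_one_succ_right h1', List.foldl_append, ih hm']
      simp only [List.foldl_cons, List.foldl_nil]
      have hcut : PySem.List.slice a none (some (m : Int)) = a.take m :=
        PySem.List.slice_to_natCast a m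
      rw [hcut]
      by_cases hc : PySem.Set.equal (PySem.Set.ofList (a.take m)) (PySem.Set.ofList a) = true
      · have hlen : (PySem.Set.ofList (a.take m)).length = (PySem.Set.ofList a).length :=
          pv_len_eq_of_equal _ _ hc
        have hcle : (PySem.Set.ofList a).length ≤ m := by
          rw [← hlen]
          calc (PySem.Set.ofList (a.take m)).length ≤ (a.take m).length :=
                PySem.Set.length_ofList_le _
            _ ≤ m := by simp
        have hcm : ((PySem.Set.ofList a).length : Int) < (a.length : Int) := by
          have : m < a.length := hm
          exact_mod_cast lt_of_le_of_lt hcle this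
        by_cases hprev : 2 ≤ m ∧
            PySem.Set.equal (PySem.Set.ofList (a.take (m - 1))) (PySem.Set.ofList a) = true
        · simp [hprev, hc, hlen, Nat.le_succ_of_le hprev.1,
            show m + 1 - 1 = m from rfl]
        · simp only [hprev, ite_false]
          simp [hc, hlen, hcm, show (2:Nat) ≤ m + 1 from by omega,
            show m + 1 - 1 = m from rfl]
      · have hprev : ¬ PySem.Set.equal (PySem.Set.ofList (a.take (m - 1))) (PySem.Set.ofList a)
            = true := fun h => hc (pv_cond_mono a (m - 1) m (Nat.sub_le m 1) h)
        simp [hc, hprev, show m + 1 - 1 = m from rfl]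

-- the last-element criterion: set(a[:-1]) == set(a) iff the last element repeats
lemma pv_last_crit (xs : List Int) (x : Int) :
    PySem.Set.equal (PySem.Set.ofList xs) (PySem.Set.ofList (xs ++ [x])) = true ↔ x ∈ xs := by
  rw [PySem.Set.equal_iff]
  constructor
  · intro h
    have := (h x).2
    simp only [PySem.Set.mem_ofList] at this
    exact this (by simp)
  · intro hx y
    simp only [PySem.Set.mem_ofList, List.mem_append, List.mem_singleton]
    constructor
    · exact fun h => Or.inl h
    · rintro (h | rfl)
      · exact h
      · exact hx

-- ===== VERDICT (by name: the statement is the Claim_ definition above) =====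
theorem solution_spec : Claim_equal_solution := by
  intro a _
  unfold Spec_solution solution solution_alt
  rw [PySem.List.len_eq]
  rw [pv_loop_spec a a.length le_rfl]
  rcases List.eq_nil_or_concat a with rfl | ⟨xs, x, rfl⟩
  · simp
  · simp only [List.concat_eq_append]
    have hlast : (xs ++ [x]).getLast? = some x := by simp
    have hdrop : (xs ++ [x]).dropLast = xs := by simp
    have htake : (xs ++ [x]).take ((xs ++ [x]).length - 1) = xs := by
      simp
    rw [hlast, hdrop, htake]
    by_cases hx : x ∈ xs
    · have hne : xs ≠ [] := fun h => by subst h; simp at hx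
      simp [hx, (pv_last_crit xs x).2 hx]
      exact fun h => absurd h hne
    · simp [hx]
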